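-- pv_equiv track=rewrite | github.com/Christina96/university | musical_rythms/musical_rythms.py | vector_space_f
-- ===== SOURCE A (Python) =====
-- def vector_space_f(euclid_list):
--     """
--     Function creates rhythm with the form of vector space.
--     :param euclid_list: The list with the euclid rhythm
--     :return: The vector space
--     """
--     vector_space = []
--     for step in range(0, len(euclid_list)):
--         vector = 1
--         if euclid_list[step] == 1:
--             while step + vector < len(euclid_list) and \
--                             euclid_list[step + vector] == 0:
--                 vector += 1
--             vector_space.append(vector)
--     return vector_space
-- ===== SOURCE B (Python) =====
-- def vector_space_f(euclid_list):
--     """Single backwards pass: keep the running distance to the next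
--     nonzero element (or to the end) and emit it at every 1-onset."""
--     out = []
--     dist = 1
--     for v in reversed(euclid_list):
--         if v == 1:
--             out.append(dist)
--         dist = 1 if v != 0 else dist + 1
--     out.reverse()
--     return out
-- ===== Notes on version B (the rewrite author's own statement) =====
-- stated objective: alternative
-- what changed: Replaces the forward scan with an inner zero-counting while-loop by a single backwards pass that maintains the running distance to the next nonzero element, emitting it at each 1-entry.
import Mathlib
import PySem

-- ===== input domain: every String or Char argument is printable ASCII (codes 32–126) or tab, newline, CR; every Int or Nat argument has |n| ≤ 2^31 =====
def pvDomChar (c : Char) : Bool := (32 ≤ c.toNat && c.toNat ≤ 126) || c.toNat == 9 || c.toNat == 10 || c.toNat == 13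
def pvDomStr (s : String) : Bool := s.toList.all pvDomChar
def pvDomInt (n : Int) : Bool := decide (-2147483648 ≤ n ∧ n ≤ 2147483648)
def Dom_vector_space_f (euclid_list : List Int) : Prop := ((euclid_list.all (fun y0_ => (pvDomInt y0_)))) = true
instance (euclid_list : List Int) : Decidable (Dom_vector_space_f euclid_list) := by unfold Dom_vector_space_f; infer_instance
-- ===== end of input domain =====

-- B replaces A's forward scan with an inner zero-counting while-loop by a single
-- backwards pass maintaining the running distance to the next nonzero element.

-- ===== PORT A =====
-- inner `while step + vector < len and euclid_list[step + vector] == 0: vector += 1`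
-- (the guarded index is always in range, so List.getD is exact here)
def aWhile (l : List Int) (step vector : Nat) : Nat :=
  if h : step + vector < l.length ∧ l.getD (step + vector) 0 = 0 then
    aWhile l step (vector + 1)
  else vector
termination_by l.length - (step + vector)
decreasing_by omega

-- `for step in range(0, len(euclid_list))`, appending at each 1-entry
def vector_space_f (euclid_list : List Int) : List Int :=
  (List.range euclid_list.length).foldl
    (fun acc step =>
      if euclid_list.getD step 0 = 1 then acc ++ [((aWhile euclid_list step 1 : Nat) : Int)]
      else acc) []

-- ===== PORT B =====
-- one loop-body step of B: (out, dist) updated by the current value v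
def bStep (st : List Int × Int) (v : Int) : List Int × Int :=
  ((if v = 1 then st.1 ++ [st.2] else st.1), if v ≠ 0 then 1 else st.2 + 1)

def vector_space_f_alt (euclid_list : List Int) : List Int :=
  (euclid_list.reverse.foldl bStep ([], 1)).1.reverse

-- ===== PRECONDITION & SPEC =====
def Spec_vector_space_f (euclid_list : List Int) (out : List Int) : Prop := out = vector_space_f_alt euclid_list
instance (euclid_list : List Int) (out : List Int) : Decidable (Spec_vector_space_f euclid_list out) := by unfold Spec_vector_space_f; infer_instance

-- ===== CLAIM (what is proved, stated in full; the proofs are below) =====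
def Claim_equal_vector_space_f : Prop := ∀ (euclid_list : List Int), Dom_vector_space_f euclid_list → Spec_vector_space_f euclid_list (vector_space_f euclid_list)

-- ===== LEMMAS AND PROOFS =====

-- leading zeros of a list
def countZ : List Int → Nat
  | [] => 0
  | y :: ys => if y = 0 then countZ ys + 1 else 0

-- common specification: at each 1-entry emit 1 + (number of zeros that follow it)
def specV : List Int → List Int
  | [] => []
  | x :: xs => if x = 1 then ((1 + countZ xs : Nat) : Int) :: specV xs else specV xs

lemma aWhile_shift (x : Int) (xs : List Int) (s v : Nat) :
    aWhile (x :: xs) (s + 1) v = aWhile xs s v := by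
  have key : ∀ n v, xs.length - (s + v) ≤ n → aWhile (x :: xs) (s + 1) v = aWhile xs s v := by
    intro n
    induction n with
    | zero =>
      intro v hv
      conv_lhs => rw [aWhile]
      conv_rhs => rw [aWhile]
      have h1 : ¬ (s + 1 + v < (x :: xs).length ∧ (x :: xs).getD (s + 1 + v) 0 = 0) := by
        simp only [List.length_cons]; omega
      have h2 : ¬ (s + v < xs.length ∧ xs.getD (s + v) 0 = 0) := by omega
      rw [dif_neg h1, dif_neg h2]
    | succ n ih =>
      intro v hv
      conv_lhs => rw [aWhile]
      conv_rhs => rw [aWhile]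
      have hidx : s + 1 + v = (s + v) + 1 := by omega
      have hcond : (s + 1 + v < (x :: xs).length ∧ (x :: xs).getD (s + 1 + v) 0 = 0)
          ↔ (s + v < xs.length ∧ xs.getD (s + v) 0 = 0) := by
        rw [hidx]; simp only [List.length_cons, List.getD_cons_succ]; omega
      by_cases hc : s + v < xs.length ∧ xs.getD (s + v) 0 = 0
      · rw [dif_pos (hcond.mpr hc), dif_pos hc]
        exact ih (v + 1) (by omega)
      · rw [dif_neg (fun h => hc (hcond.mp h)), dif_neg hc]
  exact key (xs.length - (s + v)) v le_rfl

lemma aWhile_head (x : Int) (xs : List Int) (w : Nat) :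
    aWhile (x :: xs) 0 (w + 1) = aWhile xs 0 w + 1 := by
  have key : ∀ n w, xs.length - w ≤ n → aWhile (x :: xs) 0 (w + 1) = aWhile xs 0 w + 1 := by
    intro n
    induction n with
    | zero =>
      intro w hw
      conv_lhs => rw [aWhile]
      conv_rhs => rw [aWhile]
      have h1 : ¬ (0 + (w + 1) < (x :: xs).length ∧ (x :: xs).getD (0 + (w + 1)) 0 = 0) := by
        simp only [List.length_cons]; omega
      have h2 : ¬ (0 + w < xs.length ∧ xs.getD (0 + w) 0 = 0) := by omega
      rw [dif_neg h1, dif_neg h2]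
    | succ n ih =>
      intro w hw
      conv_lhs => rw [aWhile]
      conv_rhs => rw [aWhile]
      have hcond : (0 + (w + 1) < (x :: xs).length ∧ (x :: xs).getD (0 + (w + 1)) 0 = 0)
          ↔ (0 + w < xs.length ∧ xs.getD (0 + w) 0 = 0) := by
        simp only [List.length_cons, Nat.zero_add, List.getD_cons_succ]; omega
      by_cases hc : 0 + w < xs.length ∧ xs.getD (0 + w) 0 = 0
      · rw [dif_pos (hcond.mpr hc), dif_pos hc]
        exact ih (w + 1) (by omega)
      · rw [dif_neg (fun h => hc (hcond.mp h)), dif_neg hc]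
  exact key (xs.length - w) w le_rfl

lemma aWhile_countZ : ∀ xs : List Int, aWhile xs 0 0 = countZ xs := by
  intro xs
  induction xs with
  | nil =>
    rw [aWhile]
    have : ¬ (0 + 0 < ([] : List Int).length ∧ ([] : List Int).getD (0 + 0) 0 = 0) := by simp
    rw [dif_neg this]; rfl
  | cons y ys ih =>
    rw [aWhile]
    by_cases hy : y = 0
    · have hc : 0 + 0 < (y :: ys).length ∧ (y :: ys).getD (0 + 0) 0 = 0 := by
        subst hy; simp
      rw [dif_pos hc, show (0 : Nat) + 1 = 0 + 1 from rfl, aWhile_head, ih]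
      simp [countZ, hy]
    · have hc : ¬ (0 + 0 < (y :: ys).length ∧ (y :: ys).getD (0 + 0) 0 = 0) := by
        simp [hy]
      rw [dif_neg hc]
      simp [countZ, hy]

-- A's foldl with conditional appends, as a filterMap
def aF (l : List Int) : List Int :=
  (List.range l.length).filterMap
    (fun step => if l.getD step 0 = 1 then some ((aWhile l step 1 : Nat) : Int) else none)

lemma foldl_if_append (l : List Int) :
    ∀ (is : List Nat) (acc : List Int),
      is.foldl (fun acc step =>
          if l.getD step 0 = 1 then acc ++ [((aWhile l step 1 : Nat) : Int)] else acc) acc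
      = acc ++ is.filterMap
          (fun step => if l.getD step 0 = 1 then some ((aWhile l step 1 : Nat) : Int) else none) := by
  intro is
  induction is with
  | nil => intro acc; simp
  | cons i is ih =>
    intro acc
    rw [List.foldl_cons, List.filterMap_cons]
    by_cases h : l.getD i 0 = 1
    · rw [if_pos h, if_pos h, ih]
      simp
    · rw [if_neg h, if_neg h]
      exact ih acc

lemma aF_spec : ∀ l : List Int, aF l = specV l := by
  intro l
  induction l with
  | nil => rfl
  | cons x xs ih =>
    unfold aF specV
    rw [List.length_cons, List.range_succ_eq_map, List.filterMap_cons, List.filterMap_map]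
    have hshift :
        (fun step => if (x :: xs).getD step 0 = 1
            then some ((aWhile (x :: xs) step 1 : Nat) : Int) else none) ∘ Nat.succ
        = (fun step => if xs.getD step 0 = 1
            then some ((aWhile xs step 1 : Nat) : Int) else none) := by
      funext step
      simp only [Function.comp_apply, Nat.succ_eq_add_one, List.getD_cons_succ,
        aWhile_shift]
    rw [hshift]
    have hhead : aWhile (x :: xs) 0 1 = 1 + countZ xs := by
      rw [show (1 : Nat) = 0 + 1 from rfl, aWhile_head, aWhile_countZ]; omega
    have hget0 : (x :: xs).getD 0 0 = x := rfl
    rw [hget0]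
    by_cases hx : x = 1
    · rw [if_pos hx, if_pos hx, hhead, ← ih]
      rfl
    · rw [if_neg hx, if_neg hx, ← ih]
      rfl

lemma A_eq_spec (l : List Int) : vector_space_f l = specV l := by
  unfold vector_space_f
  rw [foldl_if_append, List.nil_append]
  exact aF_spec l

lemma B_inv : ∀ l : List Int,
    l.reverse.foldl bStep ([], 1) = ((specV l).reverse, ((1 + countZ l : Nat) : Int)) := by
  intro l
  induction l with
  | nil => rfl
  | cons x xs ih =>
    rw [List.reverse_cons, List.foldl_append, ih, List.foldl_cons, List.foldl_nil]
    by_cases hx : x = 1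
    · have hx0 : ¬ x = 0 := by rw [hx]; norm_num
      simp [bStep, specV, countZ, hx]
    · by_cases hx0 : x = 0
      · simp only [bStep, specV, countZ, hx0]
        norm_num
        ring
      · simp [bStep, specV, countZ, hx, hx0]

lemma B_eq_spec (l : List Int) : vector_space_f_alt l = specV l := by
  unfold vector_space_f_alt
  rw [B_inv]
  simp

-- ===== VERDICT (by name: the statement is the Claim_ definition above) =====
theorem vector_space_f_spec : Claim_equal_vector_space_f := by
  intro l _
  unfold Spec_vector_space_f
  rw [A_eq_spec, B_eq_spec]
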